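-- pv_equiv track=rewrite | github.com/waab76/AdventOfCode | 2015/day14-2.py | in_first
-- ===== SOURCE A (Python) =====
-- def in_first(racers:dict, race_time:int)->list:
--     winning_dist = 0
--     winners = list()
--
--     for racer in racers.keys():
--         dist_per_cycle = racers[racer][0] * racers[racer][1]
--         cycle_time = racers[racer][1] + racers[racer][2]
--
--         racer_dist = (race_time // cycle_time) * dist_per_cycle
--         if race_time % cycle_time >= racers[racer][1]:
--             racer_dist += dist_per_cycle
--         else:
--             racer_dist += (race_time % cycle_time) * racers[racer][0]
--
--         if racer_dist > winning_dist:
--             winners = list()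
--             winners.append(racer)
--             winning_dist = racer_dist
--         elif racer_dist == winning_dist:
--             winners.append(racer)
--
--     return winners
-- ===== SOURCE B (Python) =====
-- def in_first(racers: dict, race_time: int) -> list:
--     def dist(v):
--         full, part = divmod(race_time, v[1] + v[2])
--         return v[0] * (v[1] * full + min(part, v[1]))
--
--     pairs = [(racer, dist(v)) for racer, v in racers.items()]
--     pairs.sort(key=lambda p: p[1], reverse=True)
--     winners = []
--     for racer, d in pairs:
--         if d != pairs[0][1]:
--             break
--         winners.append(racer)
--     return winners
-- ===== Notes on version B (the rewrite author's own statement) =====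
-- stated objective: alternative
-- what changed: Replaces A's running-max loop that resets/appends a winners list in flight by sort-then-scan: build (racer, distance) pairs with a min-based closed form, stable-sort them descending by distance, and take the leading run of ties; stability makes the tie group keep dict insertion order.
-- intended difference: On nonempty inputs where every racer's distance is negative, A returns [] because its running max starts at 0 which no racer beats or ties, while B returns the racers tied at the actual maximum distance, which is the intended 'tied at max distance' answer. — e.g. on in_first([("a", [-1, 1, 1])], 3): A returns [], B returns ["a"]
import Mathlib
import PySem

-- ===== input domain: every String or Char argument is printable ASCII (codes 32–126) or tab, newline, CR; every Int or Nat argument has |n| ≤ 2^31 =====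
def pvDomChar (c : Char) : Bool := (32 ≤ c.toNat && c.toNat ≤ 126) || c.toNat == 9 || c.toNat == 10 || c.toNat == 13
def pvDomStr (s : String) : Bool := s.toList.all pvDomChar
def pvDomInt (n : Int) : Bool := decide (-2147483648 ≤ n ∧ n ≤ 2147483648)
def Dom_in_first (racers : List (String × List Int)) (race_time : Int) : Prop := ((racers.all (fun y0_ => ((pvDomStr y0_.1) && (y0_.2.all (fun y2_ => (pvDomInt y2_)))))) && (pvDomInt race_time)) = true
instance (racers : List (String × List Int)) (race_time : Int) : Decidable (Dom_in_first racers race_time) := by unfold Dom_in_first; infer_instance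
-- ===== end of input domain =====

-- B replaces A's in-flight running-max/reset loop by sort-then-scan: build (racer, distance) pairs,
-- stable-sort descending by distance, take the leading tie run; return value only (no mutation).
-- On all-negative-distance inputs B returns the true leaders where A's 0-initialised running max returns [] (see D_).

-- ===== PORT A =====
def in_first (racers : List (String × List Int)) (race_time : Int) : List String :=
  let d := PySem.Dict.ofList racers
  (d.keys.foldl (fun (st : Int × List String) racer =>
      let v := d.getD racer []
      let dist_per_cycle := PySem.List.pyGetD v 0 0 * PySem.List.pyGetD v 1 0
      let cycle_time := PySem.List.pyGetD v 1 0 + PySem.List.pyGetD v 2 0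
      let racer_dist :=
        if PySem.Int.mod race_time cycle_time ≥ PySem.List.pyGetD v 1 0 then
          PySem.Int.floordiv race_time cycle_time * dist_per_cycle + dist_per_cycle
        else
          PySem.Int.floordiv race_time cycle_time * dist_per_cycle
            + PySem.Int.mod race_time cycle_time * PySem.List.pyGetD v 0 0
      if racer_dist > st.1 then (racer_dist, [racer])
      else if racer_dist = st.1 then (st.1, st.2 ++ [racer])
      else st)
    ((0 : Int), ([] : List String))).2

-- ===== PORT B =====
-- Source B's local helper dist(v)
def bDist (race_time : Int) (v : List Int) : Int :=
  let qr := (PySem.Int.divmod? race_time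
      (PySem.List.pyGetD v 1 0 + PySem.List.pyGetD v 2 0)).getD (0, 0)
  PySem.List.pyGetD v 0 0 * (PySem.List.pyGetD v 1 0 * qr.1 + min qr.2 (PySem.List.pyGetD v 1 0))

def in_first_alt (racers : List (String × List Int)) (race_time : Int) : List String :=
  -- pairs built by the comprehension, then sorted descending by distance (stable)
  match PySem.List.sorted
      ((PySem.Dict.ofList racers).items.map (fun p => (p.1, bDist race_time p.2)))
      (fun p => p.2) true with
  | [] => []
  -- the for-loop with break: collect while d == pairs[0][1]
  | p0 :: tl => ((p0 :: tl).takeWhile (fun p => decide (p.2 = p0.2))).map (·.1)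

-- ===== PRECONDITION & SPEC =====
-- Pre_ excludes exactly the inputs where A raises: a racer whose (final) value list has fewer
-- than three entries (IndexError) or whose fly time + rest time is 0 (ZeroDivisionError).
def Pre_in_first (racers : List (String × List Int)) (race_time : Int) : Prop :=
  ∀ p ∈ (PySem.Dict.ofList racers).items,
    3 ≤ p.2.length ∧ PySem.List.pyGetD p.2 1 0 + PySem.List.pyGetD p.2 2 0 ≠ 0
instance (racers : List (String × List Int)) (race_time : Int) : Decidable (Pre_in_first racers race_time) := by unfold Pre_in_first; infer_instance

def pvWitness_in_first : (List (String × List Int)) × Int := ([("a", [1, 2, 3]), ("b", [2, 1, 4])], 10)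

-- the distance a racer with stats [speed, fly, rest] covers in race_time seconds:
-- speed * (full-cycle flying time + flying time in the last partial cycle) — used only to state D_
def pvDist (race_time : Int) (v : List Int) : Int :=
  match v with
  | v0 :: v1 :: v2 :: _ =>
      v0 * (v1 * PySem.Int.floordiv race_time (v1 + v2)
              + min (PySem.Int.mod race_time (v1 + v2)) v1)
  | _ => 0

-- On nonempty inputs where every racer's distance is negative, A returns [] (its running max
-- starts at 0, which no racer beats or ties) while B returns the racers at the actual maximum
-- distance — the intended "tied at max distance" answer.
def D_in_first (racers : List (String × List Int)) (race_time : Int) : Prop :=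
  (PySem.Dict.ofList racers).items ≠ [] ∧
    ∀ p ∈ (PySem.Dict.ofList racers).items, pvDist race_time p.2 < 0
instance (racers : List (String × List Int)) (race_time : Int) : Decidable (D_in_first racers race_time) := by unfold D_in_first; infer_instance

def Spec_in_first (racers : List (String × List Int)) (race_time : Int) (out : List String) : Prop := ¬ D_in_first racers race_time → out = in_first_alt racers race_time
instance (racers : List (String × List Int)) (race_time : Int) (out : List String) : Decidable (Spec_in_first racers race_time out) := by unfold Spec_in_first; infer_instance

def pvDiffWitness_in_first : (List (String × List Int)) × Int := ([("a", [-1, 1, 1])], 3)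
def pvDiffWitnessOut_in_first : (List String) × (List String) := ([], ["a"])

-- ===== CLAIM (what is proved, stated in full; the proofs are below) =====
def Claim_unchanged_in_first : Prop := ∀ (racers : List (String × List Int)) (race_time : Int), Dom_in_first racers race_time → Pre_in_first racers race_time → Spec_in_first racers race_time (in_first racers race_time)
def Claim_changed_in_first : Prop := Dom_in_first (pvDiffWitness_in_first.1) (pvDiffWitness_in_first.2) ∧ Pre_in_first (pvDiffWitness_in_first.1) (pvDiffWitness_in_first.2) ∧ D_in_first (pvDiffWitness_in_first.1) (pvDiffWitness_in_first.2) ∧ in_first (pvDiffWitness_in_first.1) (pvDiffWitness_in_first.2) = pvDiffWitnessOut_in_first.1 ∧ in_first_alt (pvDiffWitness_in_first.1) (pvDiffWitness_in_first.2) = pvDiffWitnessOut_in_first.2 ∧ pvDiffWitnessOut_in_first.1 ≠ pvDiffWitnessOut_in_first.2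
def Claim_exact_in_first : Prop := ∀ (racers : List (String × List Int)) (race_time : Int), Dom_in_first racers race_time → Pre_in_first racers race_time → D_in_first racers race_time → in_first racers race_time ≠ in_first_alt racers race_time

-- ===== LEMMAS AND PROOFS =====

-- A's per-racer distance expression, abbreviated for the proofs
def portDist (race_time : Int) (v : List Int) : Int :=
  if PySem.Int.mod race_time (PySem.List.pyGetD v 1 0 + PySem.List.pyGetD v 2 0)
       ≥ PySem.List.pyGetD v 1 0 then
    PySem.Int.floordiv race_time (PySem.List.pyGetD v 1 0 + PySem.List.pyGetD v 2 0)
        * (PySem.List.pyGetD v 0 0 * PySem.List.pyGetD v 1 0)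
      + PySem.List.pyGetD v 0 0 * PySem.List.pyGetD v 1 0
  else
    PySem.Int.floordiv race_time (PySem.List.pyGetD v 1 0 + PySem.List.pyGetD v 2 0)
        * (PySem.List.pyGetD v 0 0 * PySem.List.pyGetD v 1 0)
      + PySem.Int.mod race_time (PySem.List.pyGetD v 1 0 + PySem.List.pyGetD v 2 0)
          * PySem.List.pyGetD v 0 0

theorem portDist_eq_pvDist (t : Int) (v : List Int) (h3 : 3 ≤ v.length) :
    portDist t v = pvDist t v := by
  match v, h3 with
  | v0 :: v1 :: v2 :: rest, _ =>
    show portDist t (v0 :: v1 :: v2 :: rest) = _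
    unfold portDist pvDist
    simp [pysem]
    by_cases hle : v1 ≤ PySem.Int.mod t (v1 + v2)
    · rw [if_pos hle, min_eq_right hle]; ring
    · rw [if_neg hle, min_eq_left (by omega)]; ring

theorem bDist_eq_portDist (t : Int) (v : List Int)
    (h : PySem.List.pyGetD v 1 0 + PySem.List.pyGetD v 2 0 ≠ 0) :
    bDist t v = portDist t v := by
  unfold bDist portDist
  simp only [PySem.Int.divmod?, if_neg h, Option.getD_some, PySem.Int.floordiv,
    PySem.Int.mod, ge_iff_le]
  by_cases hle : PySem.List.pyGetD v 1 0
      ≤ t.fmod (PySem.List.pyGetD v 1 0 + PySem.List.pyGetD v 2 0)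
  · rw [if_pos hle, min_eq_right hle]; ring
  · rw [if_neg hle, min_eq_left (le_of_lt (not_le.mp hle))]; ring

def stepA (t : Int) (st : Int × List String) (p : String × List Int) : Int × List String :=
  if portDist t p.2 > st.1 then (portDist t p.2, [p.1])
  else if portDist t p.2 = st.1 then (st.1, st.2 ++ [p.1])
  else st

def runMax (t : Int) (l : List (String × List Int)) (w : Int) : Int :=
  l.foldl (fun m p => max m (portDist t p.2)) w

theorem le_runMax (t : Int) (l : List (String × List Int)) (w : Int) :
    w ≤ runMax t l w ∧ ∀ p ∈ l, portDist t p.2 ≤ runMax t l w := by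
  induction l generalizing w with
  | nil => simp [runMax]
  | cons q l ih =>
    have h := ih (max w (portDist t q.2))
    refine ⟨le_trans (le_max_left _ _) h.1, ?_⟩
    intro p hp
    rcases List.mem_cons.mp hp with h' | h'
    · subst h'; exact le_trans (le_max_right _ _) h.1
    · exact h.2 p h'

theorem runMax_le (t : Int) (l : List (String × List Int)) (w m : Int)
    (hw : w ≤ m) (h : ∀ p ∈ l, portDist t p.2 ≤ m) : runMax t l w ≤ m := by
  induction l generalizing w with
  | nil => simpa [runMax] using hw
  | cons q l ih =>
    exact ih (max w (portDist t q.2)) (max_le hw (h q (by simp)))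
      (fun p hp => h p (by simp [hp]))

theorem foldA_eq (t : Int) (l : List (String × List Int)) (w : Int) (ws : List String) :
    l.foldl (stepA t) (w, ws) =
      (runMax t l w,
       (if runMax t l w ≤ w then ws else [])
         ++ (l.filter (fun p => portDist t p.2 = runMax t l w)).map (·.1)) := by
  induction l generalizing w ws with
  | nil => simp [runMax]
  | cons q l ih =>
    have hR : runMax t (q :: l) w = runMax t l (max w (portDist t q.2)) := by
      simp [runMax]
    rcases lt_trichotomy (w) (portDist t q.2) with hlt | heq | hgt
    · have hmax : max w (portDist t q.2) = portDist t q.2 := max_eq_right hlt.le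
      have hle := (le_runMax t l (portDist t q.2)).1
      simp only [List.foldl_cons, stepA, if_pos hlt, hR, hmax]
      rw [ih]
      by_cases hc : runMax t l (portDist t q.2) ≤ portDist t q.2
      · have : portDist t q.2 = runMax t l (portDist t q.2) := by omega
        simp [← this, not_le.mpr hlt]
      · have hne : ¬ (portDist t q.2 = runMax t l (portDist t q.2)) := by omega
        simp [hc, hne,
          show ¬ runMax t l (portDist t q.2) ≤ w by omega]
    · have hmax : max w (portDist t q.2) = w := by omega
      have hle := (le_runMax t l w).1
      simp only [List.foldl_cons, stepA, if_neg (by omega : ¬ portDist t q.2 > w),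
        if_pos heq.symm, hR, hmax]
      rw [ih]
      by_cases hc : runMax t l w ≤ w
      · simp [hc, show portDist t q.2 = runMax t l w by omega]
      · simp [hc, show ¬ portDist t q.2 = runMax t l w by omega]
    · have hmax : max w (portDist t q.2) = w := by omega
      have hle := (le_runMax t l w).1
      simp only [List.foldl_cons, stepA, if_neg (by omega : ¬ portDist t q.2 > w),
        if_neg (by omega : ¬ portDist t q.2 = w), hR, hmax]
      rw [ih]
      simp [show ¬ portDist t q.2 = runMax t l w by omega]

-- A's loop, rewritten over the dict's items
theorem in_first_eq_filter (racers : List (String × List Int)) (t : Int) :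
    in_first racers t =
      (((PySem.Dict.ofList racers).items.filter
          (fun p => portDist t p.2 = runMax t (PySem.Dict.ofList racers).items 0)).map (·.1)) := by
  simp only [in_first]
  have hnd := PySem.Dict.nodup_keys_ofList racers
  have hkeys : (PySem.Dict.ofList racers).keys =
      (PySem.Dict.ofList racers).items.map (·.1) := rfl
  rw [hkeys, List.foldl_map]
  rw [PySem.List.foldl_congr_mem _ _ (stepA t) _ ?_]
  · rw [foldA_eq]
    simp
  · intro acc p hp
    have hget : (PySem.Dict.ofList racers).getD p.1 [] = p.2 :=
      PySem.Dict.getD_of_mem_items _ hp hnd []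
    simp only [hget, stepA, portDist]
    rfl

-- STABILITY of the descending insertion sort on the key (·.2): inserting x into a
-- descending-sorted list puts it AFTER every element with the same key, so the
-- key-c elements of the result are those of the list, then x (if key x = c).
theorem filter_insertBy_desc (x : String × Int) (s : List (String × Int)) (c : Int)
    (hs : s.Pairwise (fun a b => b.2 ≤ a.2)) :
    (PySem.List.insertBy (fun a b => decide (b.2 < a.2)) x s).filter
        (fun p => decide (p.2 = c))
      = s.filter (fun p => decide (p.2 = c)) ++ (if x.2 = c then [x] else []) := by
  induction s with
  | nil =>
    simp only [PySem.List.insertBy, List.filter_cons, List.filter_nil, List.nil_append]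
    by_cases hxc : x.2 = c <;> simp [hxc]
  | cons y ys ih =>
    rcases List.pairwise_cons.mp hs with ⟨hy, hys⟩
    by_cases hb : y.2 < x.2
    · -- x goes in front; nothing in y :: ys has key ≥ key x, so none equal to c when x.2 = c
      simp only [PySem.List.insertBy, decide_eq_true_eq, if_pos hb]
      by_cases hxc : x.2 = c
      · have hnil : (y :: ys).filter (fun p => decide (p.2 = c)) = [] := by
          rw [List.filter_eq_nil_iff]
          intro z hz
          rcases List.mem_cons.mp hz with h' | h'
          · subst h'; simp; omega
          · have := hy z h'; simp; omega
        simp [hxc, hnil]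
      · simp [hxc]
    · simp only [PySem.List.insertBy, decide_eq_true_eq, if_neg hb]
      rw [List.filter_cons, List.filter_cons, ih hys]
      by_cases hyc : y.2 = c <;> simp [hyc]
theorem filter_sorted_rev_stable (xs : List (String × Int)) (c : Int) :
    (PySem.List.sorted xs (fun p => p.2) true).filter (fun p => decide (p.2 = c))
      = xs.filter (fun p => decide (p.2 = c)) := by
  induction xs using List.reverseRecOn with
  | nil => rfl
  | append_singleton ys x ih =>
    have hsorted : PySem.List.sorted (ys ++ [x]) (fun p => p.2) true
        = PySem.List.insertBy (fun a b => decide (b.2 < a.2)) x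
            (PySem.List.sorted ys (fun p => p.2) true) := by
      rw [PySem.List.sorted_rev_eq_foldl_insertBy, List.foldl_append,
        ← PySem.List.sorted_rev_eq_foldl_insertBy]
      rfl
    rw [hsorted,
      filter_insertBy_desc x _ c (PySem.List.sorted_pairwise_rev ys (fun p => p.2)),
      ih, List.filter_append]
    by_cases hxc : x.2 = c <;> simp [hxc]

theorem takeWhile_eq_filter_desc (s : List (String × Int)) (c : Int)
    (hs : s.Pairwise (fun a b => b.2 ≤ a.2)) (hub : ∀ p ∈ s, p.2 ≤ c) :
    s.takeWhile (fun p => decide (p.2 = c)) = s.filter (fun p => decide (p.2 = c)) := by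
  induction s with
  | nil => rfl
  | cons z t ih =>
    rcases List.pairwise_cons.mp hs with ⟨hz, ht⟩
    by_cases hzc : z.2 = c
    · rw [List.takeWhile_cons, List.filter_cons,
        ih ht (fun p hp => hub p (List.mem_cons_of_mem z hp))]
      simp [hzc]
    · have hnil : (z :: t).filter (fun p => decide (p.2 = c)) = [] := by
        rw [List.filter_eq_nil_iff]
        intro p hp
        rcases List.mem_cons.mp hp with h' | h'
        · subst h'; simp [hzc]
        · have h1 := hz p h'
          have h2 := hub z (List.mem_cons_self)
          simp; omega
      rw [hnil, List.takeWhile_cons]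
      simp [hzc]

-- B, rewritten as a filter over the items, at the head-of-sorted key
theorem in_first_alt_eq (racers : List (String × List Int)) (t : Int)
    (hpre : Pre_in_first racers t) :
    in_first_alt racers t =
      match PySem.List.sorted
          ((PySem.Dict.ofList racers).items.map (fun p => (p.1, portDist t p.2)))
          (fun p => p.2) true with
      | [] => []
      | p0 :: _ =>
          (((PySem.Dict.ofList racers).items.filter
              (fun p => portDist t p.2 = p0.2)).map (·.1)) := by
  unfold in_first_alt
  set l := (PySem.Dict.ofList racers).items with hl
  have hpairs : l.map (fun p => (p.1, bDist t p.2))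
      = l.map (fun p => (p.1, portDist t p.2)) :=
    List.map_congr_left (fun p hp => by rw [bDist_eq_portDist t p.2 (hpre p hp).2])
  rw [hpairs]
  cases hsp : PySem.List.sorted (l.map (fun p => (p.1, portDist t p.2))) (fun p => p.2) true with
  | nil => rfl
  | cons p0 tl =>
    simp only []
    have hpw : (p0 :: tl).Pairwise (fun a b : String × Int => b.2 ≤ a.2) := by
      rw [← hsp]; exact PySem.List.sorted_pairwise_rev _ _
    have hub : ∀ p ∈ p0 :: tl, p.2 ≤ p0.2 := by
      intro p hp
      rcases List.mem_cons.mp hp with h' | h'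
      · subst h'; exact le_refl _
      · exact (List.pairwise_cons.mp hpw).1 p h'
    rw [takeWhile_eq_filter_desc (p0 :: tl) p0.2 hpw hub, ← hsp,
      filter_sorted_rev_stable, List.filter_map]
    simp only [List.map_map]
    rfl

-- after the rewrites both sides are filters of l; identify the two thresholds
theorem head_sorted_is_runMax (racers : List (String × List Int)) (t : Int)
    {p0 : String × Int} {tl : List (String × Int)}
    (hsp : PySem.List.sorted
        ((PySem.Dict.ofList racers).items.map (fun p => (p.1, portDist t p.2)))
        (fun p => p.2) true = p0 :: tl)
    (h0 : 0 ≤ p0.2) :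
    runMax t (PySem.Dict.ofList racers).items 0 = p0.2 := by
  set l := (PySem.Dict.ofList racers).items with hl
  have hub : ∀ p ∈ l, portDist t p.2 ≤ p0.2 := by
    intro p hp
    exact PySem.List.key_head_sorted_rev_ge _ _ hsp _ (List.mem_map_of_mem hp)
  have hmem : p0 ∈ l.map (fun p => (p.1, portDist t p.2)) := by
    have : p0 ∈ PySem.List.sorted (l.map (fun p => (p.1, portDist t p.2))) (fun p => p.2) true := by
      rw [hsp]; exact List.mem_cons_self
    exact (PySem.List.mem_sorted _ _ _ p0).mp this
  rcases List.mem_map.mp hmem with ⟨q, hq, hqv⟩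
  have h1 : runMax t l 0 ≤ p0.2 := runMax_le t l 0 p0.2 h0 hub
  have h2 : portDist t q.2 ≤ runMax t l 0 := (le_runMax t l 0).2 q hq
  have h3 : portDist t q.2 = p0.2 := congrArg Prod.snd hqv
  omega

-- ===== VERDICT (by name: the statement is the Claim_ definition above) =====
theorem in_first_spec : Claim_unchanged_in_first := by
  intro racers t _ hpre hnd
  rw [in_first_eq_filter, in_first_alt_eq racers t hpre]
  set l := (PySem.Dict.ofList racers).items with hl
  cases hsp : PySem.List.sorted (l.map (fun p => (p.1, portDist t p.2))) (fun p => p.2) true with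
  | nil =>
    have : l.map (fun p => (p.1, portDist t p.2)) = [] :=
      (PySem.List.sorted_eq_nil_iff _ _ _).mp hsp
    have hlnil : l = [] := by simpa using this
    simp [hlnil]
  | cons p0 tl =>
    simp only []
    have hlnil : l ≠ [] := by
      intro h
      rw [h] at hsp
      simp [PySem.List.sorted] at hsp
    have h0 : 0 ≤ p0.2 := by
      by_contra hneg
      refine hnd ⟨hlnil, fun p hp => ?_⟩
      have hub : portDist t p.2 ≤ p0.2 :=
        PySem.List.key_head_sorted_rev_ge _ _ hsp _ (List.mem_map_of_mem hp)
      rw [← portDist_eq_pvDist t p.2 (hpre p hp).1]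
      omega
    rw [head_sorted_is_runMax racers t hsp h0]

theorem in_first_changed : Claim_changed_in_first := by
  unfold Claim_changed_in_first; decide

theorem in_first_tight : Claim_exact_in_first := by
  intro racers t _ hpre hd
  obtain ⟨hnil, hneg⟩ := hd
  rw [in_first_eq_filter, in_first_alt_eq racers t hpre]
  set l := (PySem.Dict.ofList racers).items with hl
  have hA : l.filter (fun p => portDist t p.2 = runMax t l 0) = [] := by
    rw [List.filter_eq_nil_iff]
    intro p hp
    have h1 : pvDist t p.2 < 0 := hneg p hp
    rw [← portDist_eq_pvDist t p.2 (hpre p hp).1] at h1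
    have h2 := (le_runMax t l 0).1
    simp only [decide_eq_true_eq]
    omega
  cases hsp : PySem.List.sorted (l.map (fun p => (p.1, portDist t p.2))) (fun p => p.2) true with
  | nil =>
    have : l.map (fun p => (p.1, portDist t p.2)) = [] :=
      (PySem.List.sorted_eq_nil_iff _ _ _).mp hsp
    exact absurd (by simpa using this) hnil
  | cons p0 tl =>
    simp only [hA, List.map_nil]
    have hmem : p0 ∈ l.map (fun p => (p.1, portDist t p.2)) := by
      have : p0 ∈ PySem.List.sorted (l.map (fun p => (p.1, portDist t p.2))) (fun p => p.2) true := by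
        rw [hsp]; exact List.mem_cons_self
      exact (PySem.List.mem_sorted _ _ _ p0).mp this
    rcases List.mem_map.mp hmem with ⟨q, hq, hqv⟩
    intro hcontra
    have h3 : portDist t q.2 = p0.2 := congrArg Prod.snd hqv
    have : q ∈ l.filter (fun p => portDist t p.2 = p0.2) := by
      simp [List.mem_filter, hq, h3]
    have : q.1 ∈ (l.filter (fun p => portDist t p.2 = p0.2)).map (·.1) :=
      List.mem_map_of_mem this
    rw [← hcontra] at this
    simp at this
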